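-- pv_equiv track=rewrite | github.com/PlayfulProcess/recursive.eco-schemas | scripts/generate_tarot_of_all_tarots.py | extract_rank_from_name
-- ===== SOURCE A (Python) =====
-- FRENCH_RANK_MAP = {
--     "as": 1, "ace": 1,
--     "deux": 2, "two": 2,
--     "trois": 3, "three": 3,
--     "quatre": 4, "four": 4,
--     "cinq": 5, "five": 5,
--     "six": 6,
--     "sept": 7, "seven": 7,
--     "huit": 8, "eight": 8,
--     "neuf": 9, "nine": 9,
--     "dix": 10, "ten": 10,
--     "valet": 11, "page": 11, "knave": 11,
--     "chevalier": 12, "knight": 12,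
--     "reine": 13, "queen": 13,
--     "roi": 14, "king": 14,
--     "le roi": 14, "la reine": 13, "le chevalier": 12, "le valet": 11,
-- }
--
-- def extract_rank_from_name(name):
--     """Extract rank number (1-14) from card name like 'Roi de Coupe', 'Le Roi de Baton', or 'Ace of Cups'."""
--     lower = name.lower().strip()
--     # Strip French articles
--     for article in ["le ", "la ", "l'", "les "]:
--         if lower.startswith(article):
--             lower = lower[len(article):]
--             break
--     for rank_word, rank_num in sorted(FRENCH_RANK_MAP.items(), key=lambda x: -len(x[0])):
--         if lower.startswith(rank_word):
--             return rank_num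
--     return None
-- ===== SOURCE B (Python) =====
-- RANK_WORDS = [
--     (1, ["as", "ace"]),
--     (2, ["deux", "two"]),
--     (3, ["trois", "three"]),
--     (4, ["quatre", "four"]),
--     (5, ["cinq", "five"]),
--     (6, ["six"]),
--     (7, ["sept", "seven"]),
--     (8, ["huit", "eight"]),
--     (9, ["neuf", "nine"]),
--     (10, ["dix", "ten"]),
--     (11, ["valet", "page", "knave", "le valet"]),
--     (12, ["chevalier", "knight", "le chevalier"]),
--     (13, ["reine", "queen", "la reine"]),
--     (14, ["roi", "king", "le roi"]),
-- ]
-- _LOOKUP = {w: r for r, ws in RANK_WORDS for w in ws}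
--
-- def extract_rank_from_name(name):
--     """Extract rank number (1-14) from a card name: longest matching rank-word prefix."""
--     lower = name.lower().strip()
--     # Strip French articles
--     if lower.startswith("le "):
--         lower = lower[3:]
--     elif lower.startswith("la "):
--         lower = lower[3:]
--     elif lower.startswith("l'"):
--         lower = lower[2:]
--     elif lower.startswith("les "):
--         lower = lower[4:]
--     # One left-to-right pass: grow the prefix a character at a time (rank words
--     # are at most 12 chars) and remember the rank of the longest prefix that is
--     # a rank word; the longest match is what A's descending-length scan returns.
--     best = None
--     prefix = ""
--     for ch in lower[:12]:
--         prefix += ch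
--         r = _LOOKUP.get(prefix)
--         if r is not None:
--             best = r
--     return best
-- ===== Notes on version B (the rewrite author's own statement) =====
-- stated objective: alternative
-- what changed: A sorts all 32 rank words by descending length and scans them with startswith until one matches; B makes a single left-to-right pass over the (at most 12) leading characters of the stripped name, growing a prefix one character at a time, hash-looking each prefix up in a rank table and keeping the last (longest) hit; the article stripping becomes an if/elif chain instead of a loop over a list.
import Mathlib
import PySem

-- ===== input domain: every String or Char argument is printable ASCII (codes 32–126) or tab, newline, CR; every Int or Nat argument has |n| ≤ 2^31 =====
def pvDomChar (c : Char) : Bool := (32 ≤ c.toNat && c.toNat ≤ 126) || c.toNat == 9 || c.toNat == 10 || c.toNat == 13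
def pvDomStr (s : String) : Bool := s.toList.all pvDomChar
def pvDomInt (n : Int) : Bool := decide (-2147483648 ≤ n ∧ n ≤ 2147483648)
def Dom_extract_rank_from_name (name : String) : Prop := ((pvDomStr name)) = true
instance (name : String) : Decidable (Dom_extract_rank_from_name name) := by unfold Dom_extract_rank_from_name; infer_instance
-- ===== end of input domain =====

-- B replaces A's startswith-scan over all 32 keys sorted by descending length with a single
-- left-to-right pass over the first ≤ 12 characters of the stripped name, growing a prefix and
-- keeping the last (= longest) rank-table hit (objective: alternative).

-- ===== PORT A =====

-- module constant FRENCH_RANK_MAP (dict keyed by the card-word, kept as List Char)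
def frenchRankMap : PySem.Dict (List Char) Int :=
  PySem.Dict.ofList [("as".toList, 1), ("ace".toList, 1), ("deux".toList, 2), ("two".toList, 2), ("trois".toList, 3), ("three".toList, 3), ("quatre".toList, 4), ("four".toList, 4), ("cinq".toList, 5), ("five".toList, 5), ("six".toList, 6), ("sept".toList, 7), ("seven".toList, 7), ("huit".toList, 8), ("eight".toList, 8), ("neuf".toList, 9), ("nine".toList, 9), ("dix".toList, 10), ("ten".toList, 10), ("valet".toList, 11), ("page".toList, 11), ("knave".toList, 11), ("chevalier".toList, 12), ("knight".toList, 12), ("reine".toList, 13), ("queen".toList, 13), ("roi".toList, 14), ("king".toList, 14), ("le roi".toList, 14), ("la reine".toList, 13), ("le chevalier".toList, 12), ("le valet".toList, 11)]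

-- A's article-stripping for-loop: strip the first matching article, then break
def articleLoop (articles : List (List Char)) (lower : List Char) : List Char :=
  match articles with
  | [] => lower
  | a :: rest =>
      if PySem.Chars.startswith lower a then
        PySem.Chars.slice lower (some (Int.ofNat a.length)) none
      else articleLoop rest lower

-- A's for-loop over sorted(FRENCH_RANK_MAP.items(), key=lambda x: -len(x[0])) with early return
def rankScan (pairsList : List (List Char × Int)) (lower : List Char) : Option Int :=
  match pairsList with
  | [] => none
  | (rank_word, rank_num) :: rest =>
      if PySem.Chars.startswith lower rank_word then some rank_num
      else rankScan rest lower

def extract_rank_from_name (name : String) : Option Int :=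
  let lower0 := PySem.Chars.strip (PySem.Chars.lower name.toList)
  let lower := articleLoop ["le ".toList, "la ".toList, "l'".toList, "les ".toList] lower0
  rankScan (PySem.List.sorted frenchRankMap.items (fun x => -(Int.ofNat x.1.length)) false) lower

-- ===== PORT B =====

-- module constant RANK_WORDS: each rank with its spellings
def rankWords : List (Int × List (List Char)) :=
  [(1, ["as".toList, "ace".toList]),
   (2, ["deux".toList, "two".toList]),
   (3, ["trois".toList, "three".toList]),
   (4, ["quatre".toList, "four".toList]),
   (5, ["cinq".toList, "five".toList]),
   (6, ["six".toList]),
   (7, ["sept".toList, "seven".toList]),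
   (8, ["huit".toList, "eight".toList]),
   (9, ["neuf".toList, "nine".toList]),
   (10, ["dix".toList, "ten".toList]),
   (11, ["valet".toList, "page".toList, "knave".toList, "le valet".toList]),
   (12, ["chevalier".toList, "knight".toList, "le chevalier".toList]),
   (13, ["reine".toList, "queen".toList, "la reine".toList]),
   (14, ["roi".toList, "king".toList, "le roi".toList])]

-- the dict comprehension _LOOKUP = {w: r for r, ws in RANK_WORDS for w in ws}
def rankLookup : PySem.Dict (List Char) Int :=
  rankWords.foldl (fun d p => p.2.foldl (fun d w => d.insert w p.1) d) PySem.Dict.empty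

def extract_rank_from_name_alt (name : String) : Option Int :=
  let lower0 := PySem.Chars.strip (PySem.Chars.lower name.toList)
  -- the if/elif article chain
  let lower :=
    if PySem.Chars.startswith lower0 "le ".toList then PySem.Chars.slice lower0 (some 3) none
    else if PySem.Chars.startswith lower0 "la ".toList then PySem.Chars.slice lower0 (some 3) none
    else if PySem.Chars.startswith lower0 "l'".toList then PySem.Chars.slice lower0 (some 2) none
    else if PySem.Chars.startswith lower0 "les ".toList then PySem.Chars.slice lower0 (some 4) none
    else lower0
  -- for ch in lower[:12]: grow the prefix, remember the last table hit
  ((PySem.Chars.slice lower none (some 12)).foldl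
    (fun (st : Option Int × List Char) ch =>
      let pre := st.2 ++ [ch]
      match rankLookup.get? pre with
      | some r => (some r, pre)
      | none => (st.1, pre))
    (none, [])).1

-- ===== PRECONDITION & SPEC =====
def Spec_extract_rank_from_name (name : String) (out : Option Int) : Prop := out = extract_rank_from_name_alt name
instance (name : String) (out : Option Int) : Decidable (Spec_extract_rank_from_name name out) := by unfold Spec_extract_rank_from_name; infer_instance

-- ===== CLAIM (what is proved, stated in full; the proofs are below) =====
def Claim_equal_extract_rank_from_name : Prop := ∀ (name : String), Dom_extract_rank_from_name name → Spec_extract_rank_from_name name (extract_rank_from_name name)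

-- ===== LEMMAS AND PROOFS =====

def block12 : List (List Char × Int) := [(['l', 'e', ' ', 'c', 'h', 'e', 'v', 'a', 'l', 'i', 'e', 'r'], 12)]

def block9 : List (List Char × Int) := [(['c', 'h', 'e', 'v', 'a', 'l', 'i', 'e', 'r'], 12)]

def block8 : List (List Char × Int) := [(['l', 'a', ' ', 'r', 'e', 'i', 'n', 'e'], 13), (['l', 'e', ' ', 'v', 'a', 'l', 'e', 't'], 11)]

def block6 : List (List Char × Int) := [(['q', 'u', 'a', 't', 'r', 'e'], 4), (['k', 'n', 'i', 'g', 'h', 't'], 12), (['l', 'e', ' ', 'r', 'o', 'i'], 14)]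

def block5 : List (List Char × Int) := [(['t', 'r', 'o', 'i', 's'], 3), (['t', 'h', 'r', 'e', 'e'], 3), (['s', 'e', 'v', 'e', 'n'], 7), (['e', 'i', 'g', 'h', 't'], 8), (['v', 'a', 'l', 'e', 't'], 11), (['k', 'n', 'a', 'v', 'e'], 11), (['r', 'e', 'i', 'n', 'e'], 13), (['q', 'u', 'e', 'e', 'n'], 13)]

def block4 : List (List Char × Int) := [(['d', 'e', 'u', 'x'], 2), (['f', 'o', 'u', 'r'], 4), (['c', 'i', 'n', 'q'], 5), (['f', 'i', 'v', 'e'], 5), (['s', 'e', 'p', 't'], 7), (['h', 'u', 'i', 't'], 8), (['n', 'e', 'u', 'f'], 9), (['n', 'i', 'n', 'e'], 9), (['p', 'a', 'g', 'e'], 11), (['k', 'i', 'n', 'g'], 14)]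

def block3 : List (List Char × Int) := [(['a', 'c', 'e'], 1), (['t', 'w', 'o'], 2), (['s', 'i', 'x'], 6), (['d', 'i', 'x'], 10), (['t', 'e', 'n'], 10), (['r', 'o', 'i'], 14)]

def block2 : List (List Char × Int) := [(['a', 's'], 1)]


theorem items_lit : frenchRankMap.items = [(['a', 's'], 1), (['a', 'c', 'e'], 1), (['d', 'e', 'u', 'x'], 2), (['t', 'w', 'o'], 2), (['t', 'r', 'o', 'i', 's'], 3), (['t', 'h', 'r', 'e', 'e'], 3), (['q', 'u', 'a', 't', 'r', 'e'], 4), (['f', 'o', 'u', 'r'], 4), (['c', 'i', 'n', 'q'], 5), (['f', 'i', 'v', 'e'], 5), (['s', 'i', 'x'], 6), (['s', 'e', 'p', 't'], 7), (['s', 'e', 'v', 'e', 'n'], 7), (['h', 'u', 'i', 't'], 8), (['e', 'i', 'g', 'h', 't'], 8), (['n', 'e', 'u', 'f'], 9), (['n', 'i', 'n', 'e'], 9), (['d', 'i', 'x'], 10), (['t', 'e', 'n'], 10), (['v', 'a', 'l', 'e', 't'], 11), (['p', 'a', 'g', 'e'], 11), (['k', 'n', 'a', 'v', 'e'], 11),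 (['c', 'h', 'e', 'v', 'a', 'l', 'i', 'e', 'r'], 12), (['k', 'n', 'i', 'g', 'h', 't'], 12), (['r', 'e', 'i', 'n', 'e'], 13), (['q', 'u', 'e', 'e', 'n'], 13), (['r', 'o', 'i'], 14), (['k', 'i', 'n', 'g'], 14), (['l', 'e', ' ', 'r', 'o', 'i'], 14), (['l', 'a', ' ', 'r', 'e', 'i', 'n', 'e'], 13), (['l', 'e', ' ', 'c', 'h', 'e', 'v', 'a', 'l', 'i', 'e', 'r'], 12), (['l', 'e', ' ', 'v', 'a', 'l', 'e', 't'], 11)] := by decide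

-- A's sorted list is the length-blocks in descending length order (stable sort: insertion order inside a block)
theorem sorted_lit :
    PySem.List.sorted frenchRankMap.items (fun x => -(Int.ofNat x.1.length)) false =
      block12 ++ block9 ++ block8 ++ block6 ++ block5 ++ block4 ++ block3 ++ block2 := by decide

-- startswith as an equality test on the length-matched prefix
theorem sw_take (lower k : List Char) :
    PySem.Chars.startswith lower k = (k == lower.take k.length) := by
  rw [Bool.eq_iff_iff]
  simp only [PySem.Chars.startswith_iff, beq_iff_eq]
  exact ⟨fun h => List.prefix_iff_eq_take.mp h, fun h => List.prefix_iff_eq_take.mpr h⟩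

theorem get?_len1 (t : List Char) (ht : t.length = 1) : frenchRankMap.get? t = none := by
  have hlen : ∀ k : List Char, ¬ k.length = 1 → (k == t) = false := by
    intro k hk; simp only [beq_eq_false_iff_ne]; exact fun he => hk (he ▸ ht)
  simp [PySem.Dict.get?, items_lit, hlen]

theorem get?_len2 (t : List Char) (ht : t.length = 2) :
    frenchRankMap.get? t = (if ['a', 's'] == t then some 1 else none) := by
  have hlen : ∀ k : List Char, ¬ k.length = 2 → (k == t) = false := by
    intro k hk; simp only [beq_eq_false_iff_ne]; exact fun he => hk (he ▸ ht)
  by_cases h0 : ['a', 's'] == t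
  · simp [PySem.Dict.get?, items_lit, h0]
  · simp [PySem.Dict.get?, items_lit, hlen, h0]

theorem get?_len3 (t : List Char) (ht : t.length = 3) :
    frenchRankMap.get? t = (if ['a', 'c', 'e'] == t then some 1 else if ['t', 'w', 'o'] == t then some 2 else if ['s', 'i', 'x'] == t then some 6 else if ['d', 'i', 'x'] == t then some 10 else if ['t', 'e', 'n'] == t then some 10 else if ['r', 'o', 'i'] == t then some 14 else none) := by
  have hlen : ∀ k : List Char, ¬ k.length = 3 → (k == t) = false := by
    intro k hk; simp only [beq_eq_false_iff_ne]; exact fun he => hk (he ▸ ht)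
  by_cases h0 : ['a', 'c', 'e'] == t
  · simp [PySem.Dict.get?, items_lit, hlen, h0]
  by_cases h1 : ['t', 'w', 'o'] == t
  · simp [PySem.Dict.get?, items_lit, hlen, h0, h1]
  by_cases h2 : ['s', 'i', 'x'] == t
  · simp [PySem.Dict.get?, items_lit, hlen, h0, h1, h2]
  by_cases h3 : ['d', 'i', 'x'] == t
  · simp [PySem.Dict.get?, items_lit, hlen, h0, h1, h2, h3]
  by_cases h4 : ['t', 'e', 'n'] == t
  · simp [PySem.Dict.get?, items_lit, hlen, h0, h1, h2, h3, h4]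
  by_cases h5 : ['r', 'o', 'i'] == t
  · simp [PySem.Dict.get?, items_lit, hlen, h0, h1, h2, h3, h4, h5]
  · simp [PySem.Dict.get?, items_lit, hlen, h0, h1, h2, h3, h4, h5]

theorem get?_len4 (t : List Char) (ht : t.length = 4) :
    frenchRankMap.get? t = (if ['d', 'e', 'u', 'x'] == t then some 2 else if ['f', 'o', 'u', 'r'] == t then some 4 else if ['c', 'i', 'n', 'q'] == t then some 5 else if ['f', 'i', 'v', 'e'] == t then some 5 else if ['s', 'e', 'p', 't'] == t then some 7 else if ['h', 'u', 'i', 't'] == t then some 8 else if ['n', 'e', 'u', 'f'] == t then some 9 else if ['n', 'i', 'n', 'e'] == t then some 9 else if ['p', 'a', 'g', 'e'] == t then some 11 else if ['k', 'i', 'n', 'g'] == t then some 14 else none) := by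
  have hlen : ∀ k : List Char, ¬ k.length = 4 → (k == t) = false := by
    intro k hk; simp only [beq_eq_false_iff_ne]; exact fun he => hk (he ▸ ht)
  by_cases h0 : ['d', 'e', 'u', 'x'] == t
  · simp [PySem.Dict.get?, items_lit, hlen, h0]
  by_cases h1 : ['f', 'o', 'u', 'r'] == t
  · simp [PySem.Dict.get?, items_lit, hlen, h0, h1]
  by_cases h2 : ['c', 'i', 'n', 'q'] == t
  · simp [PySem.Dict.get?, items_lit, hlen, h0, h1, h2]
  by_cases h3 : ['f', 'i', 'v', 'e'] == t
  · simp [PySem.Dict.get?, items_lit, hlen, h0, h1, h2, h3]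
  by_cases h4 : ['s', 'e', 'p', 't'] == t
  · simp [PySem.Dict.get?, items_lit, hlen, h0, h1, h2, h3, h4]
  by_cases h5 : ['h', 'u', 'i', 't'] == t
  · simp [PySem.Dict.get?, items_lit, hlen, h0, h1, h2, h3, h4, h5]
  by_cases h6 : ['n', 'e', 'u', 'f'] == t
  · simp [PySem.Dict.get?, items_lit, hlen, h0, h1, h2, h3, h4, h5, h6]
  by_cases h7 : ['n', 'i', 'n', 'e'] == t
  · simp [PySem.Dict.get?, items_lit, hlen, h0, h1, h2, h3, h4, h5, h6, h7]
  by_cases h8 : ['p', 'a', 'g', 'e'] == t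
  · simp [PySem.Dict.get?, items_lit, hlen, h0, h1, h2, h3, h4, h5, h6, h7, h8]
  by_cases h9 : ['k', 'i', 'n', 'g'] == t
  · simp [PySem.Dict.get?, items_lit, hlen, h0, h1, h2, h3, h4, h5, h6, h7, h8, h9]
  · simp [PySem.Dict.get?, items_lit, hlen, h0, h1, h2, h3, h4, h5, h6, h7, h8, h9]

theorem get?_len5 (t : List Char) (ht : t.length = 5) :
    frenchRankMap.get? t = (if ['t', 'r', 'o', 'i', 's'] == t then some 3 else if ['t', 'h', 'r', 'e', 'e'] == t then some 3 else if ['s', 'e', 'v', 'e', 'n'] == t then some 7 else if ['e', 'i', 'g', 'h', 't'] == t then some 8 else if ['v', 'a', 'l', 'e', 't'] == t then some 11 else if ['k', 'n', 'a', 'v', 'e'] == t then some 11 else if ['r', 'e', 'i', 'n', 'e'] == t then some 13 else if ['q', 'u', 'e', 'e', 'n'] == t then some 13 else none) := by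
  have hlen : ∀ k : List Char, ¬ k.length = 5 → (k == t) = false := by
    intro k hk; simp only [beq_eq_false_iff_ne]; exact fun he => hk (he ▸ ht)
  by_cases h0 : ['t', 'r', 'o', 'i', 's'] == t
  · simp [PySem.Dict.get?, items_lit, hlen, h0]
  by_cases h1 : ['t', 'h', 'r', 'e', 'e'] == t
  · simp [PySem.Dict.get?, items_lit, hlen, h0, h1]
  by_cases h2 : ['s', 'e', 'v', 'e', 'n'] == t
  · simp [PySem.Dict.get?, items_lit, hlen, h0, h1, h2]
  by_cases h3 : ['e', 'i', 'g', 'h', 't'] == t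
  · simp [PySem.Dict.get?, items_lit, hlen, h0, h1, h2, h3]
  by_cases h4 : ['v', 'a', 'l', 'e', 't'] == t
  · simp [PySem.Dict.get?, items_lit, hlen, h0, h1, h2, h3, h4]
  by_cases h5 : ['k', 'n', 'a', 'v', 'e'] == t
  · simp [PySem.Dict.get?, items_lit, hlen, h0, h1, h2, h3, h4, h5]
  by_cases h6 : ['r', 'e', 'i', 'n', 'e'] == t
  · simp [PySem.Dict.get?, items_lit, hlen, h0, h1, h2, h3, h4, h5, h6]
  by_cases h7 : ['q', 'u', 'e', 'e', 'n'] == t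
  · simp [PySem.Dict.get?, items_lit, hlen, h0, h1, h2, h3, h4, h5, h6, h7]
  · simp [PySem.Dict.get?, items_lit, hlen, h0, h1, h2, h3, h4, h5, h6, h7]

theorem get?_len6 (t : List Char) (ht : t.length = 6) :
    frenchRankMap.get? t = (if ['q', 'u', 'a', 't', 'r', 'e'] == t then some 4 else if ['k', 'n', 'i', 'g', 'h', 't'] == t then some 12 else if ['l', 'e', ' ', 'r', 'o', 'i'] == t then some 14 else none) := by
  have hlen : ∀ k : List Char, ¬ k.length = 6 → (k == t) = false := by
    intro k hk; simp only [beq_eq_false_iff_ne]; exact fun he => hk (he ▸ ht)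
  by_cases h0 : ['q', 'u', 'a', 't', 'r', 'e'] == t
  · simp [PySem.Dict.get?, items_lit, hlen, h0]
  by_cases h1 : ['k', 'n', 'i', 'g', 'h', 't'] == t
  · simp [PySem.Dict.get?, items_lit, hlen, h0, h1]
  by_cases h2 : ['l', 'e', ' ', 'r', 'o', 'i'] == t
  · simp [PySem.Dict.get?, items_lit, hlen, h0, h1, h2]
  · simp [PySem.Dict.get?, items_lit, hlen, h0, h1, h2]

theorem get?_len7 (t : List Char) (ht : t.length = 7) : frenchRankMap.get? t = none := by
  have hlen : ∀ k : List Char, ¬ k.length = 7 → (k == t) = false := by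
    intro k hk; simp only [beq_eq_false_iff_ne]; exact fun he => hk (he ▸ ht)
  simp [PySem.Dict.get?, items_lit, hlen]

theorem get?_len8 (t : List Char) (ht : t.length = 8) :
    frenchRankMap.get? t = (if ['l', 'a', ' ', 'r', 'e', 'i', 'n', 'e'] == t then some 13 else if ['l', 'e', ' ', 'v', 'a', 'l', 'e', 't'] == t then some 11 else none) := by
  have hlen : ∀ k : List Char, ¬ k.length = 8 → (k == t) = false := by
    intro k hk; simp only [beq_eq_false_iff_ne]; exact fun he => hk (he ▸ ht)
  by_cases h0 : ['l', 'a', ' ', 'r', 'e', 'i', 'n', 'e'] == t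
  · simp [PySem.Dict.get?, items_lit, hlen, h0]
  by_cases h1 : ['l', 'e', ' ', 'v', 'a', 'l', 'e', 't'] == t
  · simp [PySem.Dict.get?, items_lit, hlen, h0, h1]
  · simp [PySem.Dict.get?, items_lit, hlen, h0, h1]

theorem get?_len9 (t : List Char) (ht : t.length = 9) :
    frenchRankMap.get? t = (if ['c', 'h', 'e', 'v', 'a', 'l', 'i', 'e', 'r'] == t then some 12 else none) := by
  have hlen : ∀ k : List Char, ¬ k.length = 9 → (k == t) = false := by
    intro k hk; simp only [beq_eq_false_iff_ne]; exact fun he => hk (he ▸ ht)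
  by_cases h0 : ['c', 'h', 'e', 'v', 'a', 'l', 'i', 'e', 'r'] == t
  · simp [PySem.Dict.get?, items_lit, hlen, h0]
  · simp [PySem.Dict.get?, items_lit, hlen, h0]

theorem get?_len10 (t : List Char) (ht : t.length = 10) : frenchRankMap.get? t = none := by
  have hlen : ∀ k : List Char, ¬ k.length = 10 → (k == t) = false := by
    intro k hk; simp only [beq_eq_false_iff_ne]; exact fun he => hk (he ▸ ht)
  simp [PySem.Dict.get?, items_lit, hlen]

theorem get?_len11 (t : List Char) (ht : t.length = 11) : frenchRankMap.get? t = none := by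
  have hlen : ∀ k : List Char, ¬ k.length = 11 → (k == t) = false := by
    intro k hk; simp only [beq_eq_false_iff_ne]; exact fun he => hk (he ▸ ht)
  simp [PySem.Dict.get?, items_lit, hlen]

theorem get?_len12 (t : List Char) (ht : t.length = 12) :
    frenchRankMap.get? t = (if ['l', 'e', ' ', 'c', 'h', 'e', 'v', 'a', 'l', 'i', 'e', 'r'] == t then some 12 else none) := by
  have hlen : ∀ k : List Char, ¬ k.length = 12 → (k == t) = false := by
    intro k hk; simp only [beq_eq_false_iff_ne]; exact fun he => hk (he ▸ ht)
  by_cases h0 : ['l', 'e', ' ', 'c', 'h', 'e', 'v', 'a', 'l', 'i', 'e', 'r'] == t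
  · simp [PySem.Dict.get?, items_lit, hlen, h0]
  · simp [PySem.Dict.get?, items_lit, hlen, h0]


-- proof-only helpers: one prefix probe, and the chain of probes of descending length
def tryLen (L : Nat) (lower : List Char) : Option Int :=
  if L ≤ lower.length then frenchRankMap.get? (lower.take L) else none

def orTry : Nat → List Char → Option Int
  | 0, _ => none
  | m+1, lower =>
      match tryLen (m+1) lower with
      | some r => some r
      | none => orTry m lower

theorem rankScan_append (xs ys : List (List Char × Int)) (lower : List Char) :
    rankScan (xs ++ ys) lower =
      match rankScan xs lower with
      | some v => some v
      | none => rankScan ys lower := by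
  induction xs with
  | nil => simp [rankScan]
  | cons p rest ih =>
      obtain ⟨k, v⟩ := p
      by_cases h : PySem.Chars.startswith lower k
      · simp [rankScan, h]
      · simp [rankScan, h, ih]

theorem blockEq12 (lower : List Char) : tryLen 12 lower = rankScan block12 lower := by
  by_cases h : 12 ≤ lower.length
  · unfold tryLen
    rw [if_pos h, get?_len12 (lower.take 12) (by simp [List.length_take]; omega)]
    simp [block12, rankScan, sw_take]
  · unfold tryLen
    rw [if_neg h]
    have hk : ∀ k : List Char, k.length = 12 → ¬ (k = List.take 12 lower) := by
      intro k hkl he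
      have hl := congrArg List.length he
      simp [List.length_take] at hl
      omega
    simp [block12, rankScan, sw_take, hk]

theorem blockEq9 (lower : List Char) : tryLen 9 lower = rankScan block9 lower := by
  by_cases h : 9 ≤ lower.length
  · unfold tryLen
    rw [if_pos h, get?_len9 (lower.take 9) (by simp [List.length_take]; omega)]
    simp [block9, rankScan, sw_take]
  · unfold tryLen
    rw [if_neg h]
    have hk : ∀ k : List Char, k.length = 9 → ¬ (k = List.take 9 lower) := by
      intro k hkl he
      have hl := congrArg List.length he
      simp [List.length_take] at hl
      omega
    simp [block9, rankScan, sw_take, hk]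

theorem blockEq8 (lower : List Char) : tryLen 8 lower = rankScan block8 lower := by
  by_cases h : 8 ≤ lower.length
  · unfold tryLen
    rw [if_pos h, get?_len8 (lower.take 8) (by simp [List.length_take]; omega)]
    simp [block8, rankScan, sw_take]
  · unfold tryLen
    rw [if_neg h]
    have hk : ∀ k : List Char, k.length = 8 → ¬ (k = List.take 8 lower) := by
      intro k hkl he
      have hl := congrArg List.length he
      simp [List.length_take] at hl
      omega
    simp [block8, rankScan, sw_take, hk]

theorem blockEq6 (lower : List Char) : tryLen 6 lower = rankScan block6 lower := by
  by_cases h : 6 ≤ lower.length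
  · unfold tryLen
    rw [if_pos h, get?_len6 (lower.take 6) (by simp [List.length_take]; omega)]
    simp [block6, rankScan, sw_take]
  · unfold tryLen
    rw [if_neg h]
    have hk : ∀ k : List Char, k.length = 6 → ¬ (k = List.take 6 lower) := by
      intro k hkl he
      have hl := congrArg List.length he
      simp [List.length_take] at hl
      omega
    simp [block6, rankScan, sw_take, hk]

theorem blockEq5 (lower : List Char) : tryLen 5 lower = rankScan block5 lower := by
  by_cases h : 5 ≤ lower.length
  · unfold tryLen
    rw [if_pos h, get?_len5 (lower.take 5) (by simp [List.length_take]; omega)]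
    simp [block5, rankScan, sw_take]
  · unfold tryLen
    rw [if_neg h]
    have hk : ∀ k : List Char, k.length = 5 → ¬ (k = List.take 5 lower) := by
      intro k hkl he
      have hl := congrArg List.length he
      simp [List.length_take] at hl
      omega
    simp [block5, rankScan, sw_take, hk]

theorem blockEq4 (lower : List Char) : tryLen 4 lower = rankScan block4 lower := by
  by_cases h : 4 ≤ lower.length
  · unfold tryLen
    rw [if_pos h, get?_len4 (lower.take 4) (by simp [List.length_take]; omega)]
    simp [block4, rankScan, sw_take]
  · unfold tryLen
    rw [if_neg h]
    have hk : ∀ k : List Char, k.length = 4 → ¬ (k = List.take 4 lower) := by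
      intro k hkl he
      have hl := congrArg List.length he
      simp [List.length_take] at hl
      omega
    simp [block4, rankScan, sw_take, hk]

theorem blockEq3 (lower : List Char) : tryLen 3 lower = rankScan block3 lower := by
  by_cases h : 3 ≤ lower.length
  · unfold tryLen
    rw [if_pos h, get?_len3 (lower.take 3) (by simp [List.length_take]; omega)]
    simp [block3, rankScan, sw_take]
  · unfold tryLen
    rw [if_neg h]
    have hk : ∀ k : List Char, k.length = 3 → ¬ (k = List.take 3 lower) := by
      intro k hkl he
      have hl := congrArg List.length he
      simp [List.length_take] at hl
      omega
    simp [block3, rankScan, sw_take, hk]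

theorem blockEq2 (lower : List Char) : tryLen 2 lower = rankScan block2 lower := by
  by_cases h : 2 ≤ lower.length
  · unfold tryLen
    rw [if_pos h, get?_len2 (lower.take 2) (by simp [List.length_take]; omega)]
    simp [block2, rankScan, sw_take]
  · unfold tryLen
    rw [if_neg h]
    have hk : ∀ k : List Char, k.length = 2 → ¬ (k = List.take 2 lower) := by
      intro k hkl he
      have hl := congrArg List.length he
      simp [List.length_take] at hl
      omega
    simp [block2, rankScan, sw_take, hk]

theorem tryLenDead11 (lower : List Char) : tryLen 11 lower = none := by
  by_cases h : 11 ≤ lower.length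
  · unfold tryLen
    rw [if_pos h, get?_len11 (lower.take 11) (by simp [List.length_take]; omega)]
  · unfold tryLen
    rw [if_neg h]

theorem tryLenDead10 (lower : List Char) : tryLen 10 lower = none := by
  by_cases h : 10 ≤ lower.length
  · unfold tryLen
    rw [if_pos h, get?_len10 (lower.take 10) (by simp [List.length_take]; omega)]
  · unfold tryLen
    rw [if_neg h]

theorem tryLenDead7 (lower : List Char) : tryLen 7 lower = none := by
  by_cases h : 7 ≤ lower.length
  · unfold tryLen
    rw [if_pos h, get?_len7 (lower.take 7) (by simp [List.length_take]; omega)]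
  · unfold tryLen
    rw [if_neg h]

theorem tryLenDead1 (lower : List Char) : tryLen 1 lower = none := by
  by_cases h : 1 ≤ lower.length
  · unfold tryLen
    rw [if_pos h, get?_len1 (lower.take 1) (by simp [List.length_take]; omega)]
  · unfold tryLen
    rw [if_neg h]


theorem match_or (o e : Option Int) :
    (match o with | some v => some v | none => e) = o.or e := by
  cases o <;> rfl

-- A's whole scan is the chain of probes down from length 12
theorem scan_eq_orTry (lower : List Char) :
    rankScan (block12 ++ block9 ++ block8 ++ block6 ++ block5 ++ block4 ++ block3 ++ block2) lower =
      orTry 12 lower := by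
  simp only [rankScan_append, match_or, orTry]
  norm_num
  rw [← blockEq12, ← blockEq9, ← blockEq8, ← blockEq6, ← blockEq5, ← blockEq4, ← blockEq3, ← blockEq2]
  simp only [tryLenDead11, tryLenDead10, tryLenDead7, tryLenDead1, Option.none_or, Option.or_none,
    Option.or_assoc]

theorem orTry_stable : ∀ (m : Nat) (lower : List Char), lower.length ≤ m →
    orTry m lower = orTry lower.length lower := by
  intro m lower
  induction m with
  | zero => intro hm; rw [Nat.le_zero.mp hm]
  | succ p ih =>
      intro hm
      rcases Nat.lt_or_ge lower.length (p + 1) with h | h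
      · have ht : tryLen (p + 1) lower = none := by
          unfold tryLen; rw [if_neg (by omega)]
        simp only [orTry, ht]
        exact ih (by omega)
      · have he : lower.length = p + 1 := by omega
        rw [he]

-- ===== B-side lemmas =====

set_option maxRecDepth 65536 in
set_option maxHeartbeats 2000000 in
theorem rankItems_lit : rankLookup.items = [(['a', 's'], 1), (['a', 'c', 'e'], 1), (['d', 'e', 'u', 'x'], 2), (['t', 'w', 'o'], 2), (['t', 'r', 'o', 'i', 's'], 3), (['t', 'h', 'r', 'e', 'e'], 3), (['q', 'u', 'a', 't', 'r', 'e'], 4), (['f', 'o', 'u', 'r'], 4), (['c', 'i', 'n', 'q'], 5), (['f', 'i', 'v', 'e'], 5), (['s', 'i', 'x'], 6), (['s', 'e', 'p', 't'], 7), (['s', 'e', 'v', 'e', 'n'], 7), (['h', 'u', 'i', 't'], 8), (['e', 'i', 'g', 'h', 't'], 8), (['n', 'e', 'u', 'f'], 9), (['n', 'i', 'n', 'e'], 9), (['d', 'i', 'x'], 10), (['t', 'e', 'n'], 10), (['v', 'a', 'l', 'e', 't'], 11), (['p', 'a', 'g', 'e'], 11), (['k', 'n', 'a', 'v', 'e'],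 11), (['l', 'e', ' ', 'v', 'a', 'l', 'e', 't'], 11), (['c', 'h', 'e', 'v', 'a', 'l', 'i', 'e', 'r'], 12), (['k', 'n', 'i', 'g', 'h', 't'], 12), (['l', 'e', ' ', 'c', 'h', 'e', 'v', 'a', 'l', 'i', 'e', 'r'], 12), (['r', 'e', 'i', 'n', 'e'], 13), (['q', 'u', 'e', 'e', 'n'], 13), (['l', 'a', ' ', 'r', 'e', 'i', 'n', 'e'], 13), (['r', 'o', 'i'], 14), (['k', 'i', 'n', 'g'], 14), (['l', 'e', ' ', 'r', 'o', 'i'], 14)] := by decide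

set_option maxRecDepth 65536 in
set_option maxHeartbeats 8000000 in
theorem get?_eq (t : List Char) : rankLookup.get? t = frenchRankMap.get? t := by
  by_cases h0 : t = ['a', 's']
  · subst h0; decide
  by_cases h1 : t = ['a', 'c', 'e']
  · subst h1; decide
  by_cases h2 : t = ['d', 'e', 'u', 'x']
  · subst h2; decide
  by_cases h3 : t = ['t', 'w', 'o']
  · subst h3; decide
  by_cases h4 : t = ['t', 'r', 'o', 'i', 's']
  · subst h4; decide
  by_cases h5 : t = ['t', 'h', 'r', 'e', 'e']
  · subst h5; decide
  by_cases h6 : t = ['q', 'u', 'a', 't', 'r', 'e']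
  · subst h6; decide
  by_cases h7 : t = ['f', 'o', 'u', 'r']
  · subst h7; decide
  by_cases h8 : t = ['c', 'i', 'n', 'q']
  · subst h8; decide
  by_cases h9 : t = ['f', 'i', 'v', 'e']
  · subst h9; decide
  by_cases h10 : t = ['s', 'i', 'x']
  · subst h10; decide
  by_cases h11 : t = ['s', 'e', 'p', 't']
  · subst h11; decide
  by_cases h12 : t = ['s', 'e', 'v', 'e', 'n']
  · subst h12; decide
  by_cases h13 : t = ['h', 'u', 'i', 't']
  · subst h13; decide
  by_cases h14 : t = ['e', 'i', 'g', 'h', 't']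
  · subst h14; decide
  by_cases h15 : t = ['n', 'e', 'u', 'f']
  · subst h15; decide
  by_cases h16 : t = ['n', 'i', 'n', 'e']
  · subst h16; decide
  by_cases h17 : t = ['d', 'i', 'x']
  · subst h17; decide
  by_cases h18 : t = ['t', 'e', 'n']
  · subst h18; decide
  by_cases h19 : t = ['v', 'a', 'l', 'e', 't']
  · subst h19; decide
  by_cases h20 : t = ['p', 'a', 'g', 'e']
  · subst h20; decide
  by_cases h21 : t = ['k', 'n', 'a', 'v', 'e']
  · subst h21; decide
  by_cases h22 : t = ['c', 'h', 'e', 'v', 'a', 'l', 'i', 'e', 'r']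
  · subst h22; decide
  by_cases h23 : t = ['k', 'n', 'i', 'g', 'h', 't']
  · subst h23; decide
  by_cases h24 : t = ['r', 'e', 'i', 'n', 'e']
  · subst h24; decide
  by_cases h25 : t = ['q', 'u', 'e', 'e', 'n']
  · subst h25; decide
  by_cases h26 : t = ['r', 'o', 'i']
  · subst h26; decide
  by_cases h27 : t = ['k', 'i', 'n', 'g']
  · subst h27; decide
  by_cases h28 : t = ['l', 'e', ' ', 'r', 'o', 'i']
  · subst h28; decide
  by_cases h29 : t = ['l', 'a', ' ', 'r', 'e', 'i', 'n', 'e']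
  · subst h29; decide
  by_cases h30 : t = ['l', 'e', ' ', 'c', 'h', 'e', 'v', 'a', 'l', 'i', 'e', 'r']
  · subst h30; decide
  by_cases h31 : t = ['l', 'e', ' ', 'v', 'a', 'l', 'e', 't']
  · subst h31; decide
  have e0 : (['a', 's'] == t) = false := by simp only [beq_eq_false_iff_ne]; exact fun he => h0 he.symm
  have e1 : (['a', 'c', 'e'] == t) = false := by simp only [beq_eq_false_iff_ne]; exact fun he => h1 he.symm
  have e2 : (['d', 'e', 'u', 'x'] == t) = false := by simp only [beq_eq_false_iff_ne]; exact fun he => h2 he.symm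
  have e3 : (['t', 'w', 'o'] == t) = false := by simp only [beq_eq_false_iff_ne]; exact fun he => h3 he.symm
  have e4 : (['t', 'r', 'o', 'i', 's'] == t) = false := by simp only [beq_eq_false_iff_ne]; exact fun he => h4 he.symm
  have e5 : (['t', 'h', 'r', 'e', 'e'] == t) = false := by simp only [beq_eq_false_iff_ne]; exact fun he => h5 he.symm
  have e6 : (['q', 'u', 'a', 't', 'r', 'e'] == t) = false := by simp only [beq_eq_false_iff_ne]; exact fun he => h6 he.symm
  have e7 : (['f', 'o', 'u', 'r'] == t) = false := by simp only [beq_eq_false_iff_ne]; exact fun he => h7 he.symm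
  have e8 : (['c', 'i', 'n', 'q'] == t) = false := by simp only [beq_eq_false_iff_ne]; exact fun he => h8 he.symm
  have e9 : (['f', 'i', 'v', 'e'] == t) = false := by simp only [beq_eq_false_iff_ne]; exact fun he => h9 he.symm
  have e10 : (['s', 'i', 'x'] == t) = false := by simp only [beq_eq_false_iff_ne]; exact fun he => h10 he.symm
  have e11 : (['s', 'e', 'p', 't'] == t) = false := by simp only [beq_eq_false_iff_ne]; exact fun he => h11 he.symm
  have e12 : (['s', 'e', 'v', 'e', 'n'] == t) = false := by simp only [beq_eq_false_iff_ne]; exact fun he => h12 he.symm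
  have e13 : (['h', 'u', 'i', 't'] == t) = false := by simp only [beq_eq_false_iff_ne]; exact fun he => h13 he.symm
  have e14 : (['e', 'i', 'g', 'h', 't'] == t) = false := by simp only [beq_eq_false_iff_ne]; exact fun he => h14 he.symm
  have e15 : (['n', 'e', 'u', 'f'] == t) = false := by simp only [beq_eq_false_iff_ne]; exact fun he => h15 he.symm
  have e16 : (['n', 'i', 'n', 'e'] == t) = false := by simp only [beq_eq_false_iff_ne]; exact fun he => h16 he.symm
  have e17 : (['d', 'i', 'x'] == t) = false := by simp only [beq_eq_false_iff_ne]; exact fun he => h17 he.symm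
  have e18 : (['t', 'e', 'n'] == t) = false := by simp only [beq_eq_false_iff_ne]; exact fun he => h18 he.symm
  have e19 : (['v', 'a', 'l', 'e', 't'] == t) = false := by simp only [beq_eq_false_iff_ne]; exact fun he => h19 he.symm
  have e20 : (['p', 'a', 'g', 'e'] == t) = false := by simp only [beq_eq_false_iff_ne]; exact fun he => h20 he.symm
  have e21 : (['k', 'n', 'a', 'v', 'e'] == t) = false := by simp only [beq_eq_false_iff_ne]; exact fun he => h21 he.symm
  have e22 : (['c', 'h', 'e', 'v', 'a', 'l', 'i', 'e', 'r'] == t) = false := by simp only [beq_eq_false_iff_ne]; exact fun he => h22 he.symm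
  have e23 : (['k', 'n', 'i', 'g', 'h', 't'] == t) = false := by simp only [beq_eq_false_iff_ne]; exact fun he => h23 he.symm
  have e24 : (['r', 'e', 'i', 'n', 'e'] == t) = false := by simp only [beq_eq_false_iff_ne]; exact fun he => h24 he.symm
  have e25 : (['q', 'u', 'e', 'e', 'n'] == t) = false := by simp only [beq_eq_false_iff_ne]; exact fun he => h25 he.symm
  have e26 : (['r', 'o', 'i'] == t) = false := by simp only [beq_eq_false_iff_ne]; exact fun he => h26 he.symm
  have e27 : (['k', 'i', 'n', 'g'] == t) = false := by simp only [beq_eq_false_iff_ne]; exact fun he => h27 he.symm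
  have e28 : (['l', 'e', ' ', 'r', 'o', 'i'] == t) = false := by simp only [beq_eq_false_iff_ne]; exact fun he => h28 he.symm
  have e29 : (['l', 'a', ' ', 'r', 'e', 'i', 'n', 'e'] == t) = false := by simp only [beq_eq_false_iff_ne]; exact fun he => h29 he.symm
  have e30 : (['l', 'e', ' ', 'c', 'h', 'e', 'v', 'a', 'l', 'i', 'e', 'r'] == t) = false := by simp only [beq_eq_false_iff_ne]; exact fun he => h30 he.symm
  have e31 : (['l', 'e', ' ', 'v', 'a', 'l', 'e', 't'] == t) = false := by simp only [beq_eq_false_iff_ne]; exact fun he => h31 he.symm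
  simp [PySem.Dict.get?, items_lit, rankItems_lit, e0, e1, e2, e3, e4, e5, e6, e7, e8, e9, e10, e11, e12, e13, e14, e15, e16, e17, e18, e19, e20, e21, e22, e23, e24, e25, e26, e27, e28, e29, e30, e31]

-- B's probe at one length, and the chain of B-probes of descending length
def tryLenB (L : Nat) (lower : List Char) : Option Int :=
  if L ≤ lower.length then rankLookup.get? (lower.take L) else none

def orTryB : Nat → List Char → Option Int
  | 0, _ => none
  | m+1, lower =>
      match tryLenB (m+1) lower with
      | some r => some r
      | none => orTryB m lower

theorem orTryB_eq (m : Nat) (lower : List Char) : orTryB m lower = orTry m lower := by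
  induction m with
  | zero => rfl
  | succ p ih =>
      have ht : tryLenB (p+1) lower = tryLen (p+1) lower := by
        unfold tryLenB tryLen; rw [get?_eq]
      simp only [orTryB, orTry, ht, ih]

-- B's step function (as in the port)
def stepB (st : Option Int × List Char) (ch : Char) : Option Int × List Char :=
  let pre := st.2 ++ [ch]
  match rankLookup.get? pre with
  | some r => (some r, pre)
  | none => (st.1, pre)

-- the growing-prefix fold over the first n characters computes the chain of probes up to n
set_option maxRecDepth 16384 in
theorem fold_take (lower : List Char) : ∀ n, n ≤ lower.length →
    (lower.take n).foldl stepB (none, []) = (orTryB n lower, lower.take n) := by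
  intro n
  induction n with
  | zero => intro _; rfl
  | succ p ih =>
      intro hn
      have hp : p < lower.length := by omega
      have hsucc : lower.take (p + 1) = lower.take p ++ [lower[p]] :=
        List.take_succ_eq_append_getElem hp
      rw [hsucc, List.foldl_append, ih (by omega)]
      show stepB (orTryB p lower, lower.take p) lower[p] = _
      have hpre : lower.take p ++ [lower[p]] = lower.take (p + 1) := hsucc.symm
      have htB : tryLenB (p + 1) lower = rankLookup.get? (lower.take (p + 1)) := by
        unfold tryLenB; rw [if_pos hn]
      unfold stepB
      simp only [hpre, ← htB]
      cases h : tryLenB (p + 1) lower with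
      | some r => simp only [orTryB, h]
      | none => simp only [orTryB, h]

-- lower[:12] is take 12, and take 12 is take (min 12 len)
theorem slice12 (lower : List Char) :
    PySem.Chars.slice lower none (some 12) = lower.take (min 12 lower.length) := by
  rw [PySem.Chars.slice_eq_listSlice, show (12:Int) = ((12:Nat):Int) from rfl,
    PySem.List.slice_to_natCast]
  rw [← List.take_take, List.take_length]

-- the core equivalence on the already lowered/stripped string
theorem core (lower : List Char) :
    rankScan (PySem.List.sorted frenchRankMap.items (fun x => -(Int.ofNat x.1.length)) false) lower =
      ((PySem.Chars.slice lower none (some 12)).foldl stepB (none, [])).1 := by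
  rw [sorted_lit, scan_eq_orTry, slice12,
    fold_take lower (min 12 lower.length) (Nat.min_le_right _ _)]
  show orTry 12 lower = orTryB (min 12 lower.length) lower
  rw [orTryB_eq]
  rcases Nat.le_total 12 lower.length with h | h
  · rw [Nat.min_eq_left h]
  · rw [Nat.min_eq_right h, orTry_stable 12 lower h]

-- B's if/elif article chain is A's article loop
set_option maxRecDepth 16384 in
theorem art_eq (l : List Char) :
    (if PySem.Chars.startswith l "le ".toList then PySem.Chars.slice l (some 3) none
     else if PySem.Chars.startswith l "la ".toList then PySem.Chars.slice l (some 3) none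
     else if PySem.Chars.startswith l "l'".toList then PySem.Chars.slice l (some 2) none
     else if PySem.Chars.startswith l "les ".toList then PySem.Chars.slice l (some 4) none
     else l) =
    articleLoop ["le ".toList, "la ".toList, "l'".toList, "les ".toList] l := by
  simp only [articleLoop]
  rfl

-- ===== VERDICT (by name: the statement is the Claim_ definition above) =====
set_option maxRecDepth 16384 in
theorem extract_rank_from_name_spec : Claim_equal_extract_rank_from_name := by
  intro name _
  unfold Spec_extract_rank_from_name
  simp only [extract_rank_from_name, extract_rank_from_name_alt]
  rw [art_eq]
  exact core _
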